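-- pv_equiv track=rewrite | github.com/DmitriyL02/Algo | praktikum/Спринт 1. Final/B.py | hands_magic
-- ===== SOURCE A (Python) =====
-- def hands_magic(k, key_numbers):
--
--     key_counter = {}
--     points = 0
--
--     for num in key_numbers:
--         if num.isdigit():
--             if num not in key_counter:
--                 key_counter[num] = 0
--             key_counter[num] += 1
--
--     for num in key_counter:
--         if key_counter[num] <= k + k:
--             points += 1
--     return points
-- ===== SOURCE B (Python) =====
-- def hands_magic(k, key_numbers):
--     digits = sorted(s for s in key_numbers if s.isdigit())
--     points = 0
--     while digits:
--         x = digits[0]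
--         run = 1
--         while run < len(digits) and digits[run] == x:
--             run += 1
--         if run <= 2 * k:
--             points += 1
--         digits = digits[run:]
--     return points
-- ===== Notes on version B (the rewrite author's own statement) =====
-- stated objective: alternative
-- what changed: B replaces A's hash-counter dictionary with sort-based grouping: it sorts the digit strings so equal ones are adjacent and does one run-length scan, counting runs of length <= 2k.
import Mathlib
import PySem

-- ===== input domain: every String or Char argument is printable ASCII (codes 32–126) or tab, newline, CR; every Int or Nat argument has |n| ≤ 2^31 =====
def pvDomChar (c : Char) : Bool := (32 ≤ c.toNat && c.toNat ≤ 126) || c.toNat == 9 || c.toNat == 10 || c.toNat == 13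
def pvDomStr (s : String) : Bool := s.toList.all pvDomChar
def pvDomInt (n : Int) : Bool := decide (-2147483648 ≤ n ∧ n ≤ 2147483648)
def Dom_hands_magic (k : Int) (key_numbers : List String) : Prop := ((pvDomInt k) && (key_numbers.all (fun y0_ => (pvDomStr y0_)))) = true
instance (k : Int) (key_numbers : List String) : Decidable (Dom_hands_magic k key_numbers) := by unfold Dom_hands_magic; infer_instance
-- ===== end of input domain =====

-- B replaces A's hash-counter dict with sort-based grouping: sort the digit strings and run-length scan adjacent runs.

-- ===== PORT A =====
def hands_magic (k : Int) (key_numbers : List String) : Int :=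
  let key_counter := key_numbers.foldl (fun d num =>
    if PySem.Str.strIsdigit num then
      let d := if d.contains num then d else d.insert num 0
      d.modify num 0 (· + 1)
    else d) (PySem.Dict.empty : PySem.Dict String Int)
  key_counter.keys.foldl (fun points num =>
    if key_counter.getD num 0 ≤ k + k then points + 1 else points) 0

-- ===== PORT B =====
-- inner while loop: run = 1 + length of the adjacent run equal to the head; then advance past the run
def hmRunScan (k : Int) : List String → Int
  | [] => 0
  | x :: xs =>
      (if ((xs.takeWhile (fun y => y == x)).length + 1 : Int) ≤ 2 * k then 1 else 0)
        + hmRunScan k (xs.dropWhile (fun y => y == x))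
termination_by l => l.length
decreasing_by
  exact Nat.lt_succ_of_le (List.length_dropWhile_le _ _)

def hands_magic_alt (k : Int) (key_numbers : List String) : Int :=
  hmRunScan k (PySem.List.sorted (key_numbers.filter (fun s => PySem.Str.strIsdigit s)) (fun x => x) false)

-- ===== PRECONDITION & SPEC =====
def Spec_hands_magic (k : Int) (key_numbers : List String) (out : Int) : Prop := out = hands_magic_alt k key_numbers
instance (k : Int) (key_numbers : List String) (out : Int) : Decidable (Spec_hands_magic k key_numbers out) := by unfold Spec_hands_magic; infer_instance

-- ===== CLAIM (what is proved, stated in full; the proofs are below) =====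
def Claim_equal_hands_magic : Prop := ∀ (k : Int) (key_numbers : List String), Dom_hands_magic k key_numbers → Spec_hands_magic k key_numbers (hands_magic k key_numbers)

-- ===== LEMMAS AND PROOFS =====

-- A's setdefault-then-increment step is exactly Counter's modify step.
lemma step_eq_counter_step (d : PySem.Dict String Int) (x : String) :
    (let d' := if d.contains x then d else d.insert x 0
     d'.modify x 0 (· + 1)) = d.modify x 0 (· + 1) := by
  by_cases h : d.contains x = true
  · simp [h]
  · simp only [Bool.not_eq_true] at h
    simp [h, PySem.Dict.modify, PySem.Dict.insert_insert_self, PySem.Dict.getD_insert_self,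
      PySem.Dict.getD_of_not_contains (d := d) (h := h)]

lemma counter_loop_eq (kn : List String) :
    kn.foldl (fun d num =>
      if PySem.Str.strIsdigit num then
        let d := if d.contains num then d else d.insert num 0
        d.modify num 0 (· + 1)
      else d) (PySem.Dict.empty : PySem.Dict String Int)
    = PySem.Dict.counter (kn.filter (fun s => PySem.Str.strIsdigit s)) := by
  rw [PySem.Dict.counter_eq_foldl, ← PySem.List.foldl_if_eq_foldl_filter]
  exact PySem.List.foldl_congr_mem _ _ _ _ (fun acc x _ => by
    by_cases h : PySem.Str.strIsdigit x <;> simp only [h, if_true, step_eq_counter_step])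

-- the head of a sorted list does not reappear after its adjacent run
lemma not_mem_dropWhile_of_sorted (x : String) (xs : List String)
    (hp : (x :: xs).Pairwise (· ≤ ·)) : x ∉ xs.dropWhile (fun y => y == x) := by
  intro hmem
  obtain ⟨hle, hpxs⟩ := List.pairwise_cons.mp hp
  have hpr : (xs.dropWhile (fun y => y == x)).Pairwise (· ≤ ·) :=
    hpxs.sublist (List.dropWhile_sublist _)
  rcases hq : xs.dropWhile (fun y => y == x) with _ | ⟨y, r'⟩
  · rw [hq] at hmem; simp at hmem
  · have hhead := List.head_dropWhile_not (fun y => y == x) (l := xs) (by rw [hq]; simp)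
    rw [hq] at hmem hpr
    simp only [hq, List.head_cons, beq_eq_false_iff_ne, ne_eq] at hhead
    have hy_mem : y ∈ xs := (List.dropWhile_sublist _).subset (by rw [hq]; exact List.mem_cons_self)
    have hxy : x ≤ y := hle y hy_mem
    rcases List.mem_cons.mp hmem with h1 | h2
    · exact hhead h1.symm
    · have hyx : y ≤ x := (List.pairwise_cons.mp hpr).1 x h2
      exact hhead (le_antisymm hyx hxy)

-- run-length scan over a list whose equal elements are adjacent counts the distinct values with count ≤ 2k
lemma runScan_eq_aux (k : Int) (n : Nat) : ∀ (m : List String), m.length ≤ n → m.Pairwise (· ≤ ·) →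
    hmRunScan k m
      = ((PySem.Set.ofList m).countP (fun v => decide ((m.count v : Int) ≤ 2 * k)) : Int) := by
  induction n with
  | zero =>
    intro m hlen _
    have : m = [] := List.eq_nil_of_length_eq_zero (Nat.le_zero.mp hlen)
    subst this
    simp [hmRunScan, PySem.Set.ofList]
  | succ n ih =>
    intro m hlen hpw
    cases m with
    | nil => simp [hmRunScan, PySem.Set.ofList]
    | cons x xs =>
      obtain ⟨hle, hpxs⟩ := List.pairwise_cons.mp hpw
      have hxr : x ∉ xs.dropWhile (fun y => y == x) := not_mem_dropWhile_of_sorted x xs hpw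
      have hsplit : xs.takeWhile (fun y => y == x) ++ xs.dropWhile (fun y => y == x) = xs :=
        List.takeWhile_append_dropWhile
      have ht : ∀ z ∈ xs.takeWhile (fun y => y == x), z = x := fun z hz => by
        simpa using List.mem_takeWhile_imp hz
      have hpr : (xs.dropWhile (fun y => y == x)).Pairwise (· ≤ ·) :=
        hpxs.sublist (List.dropWhile_sublist _)
      have hlenr : (xs.dropWhile (fun y => y == x)).length ≤ n :=
        le_trans (List.length_dropWhile_le _ _) (Nat.le_of_succ_le_succ hlen)
      have IH := ih (xs.dropWhile (fun y => y == x)) hlenr hpr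
      -- count of x in the whole list is the adjacent-run length
      have hxs0 : xs.count x = (xs.takeWhile (fun y => y == x)).length := by
        conv_lhs => rw [← hsplit]
        rw [List.count_append, List.count_eq_zero_of_not_mem hxr,
          List.count_eq_length.mpr (fun b hb => (ht b hb).symm)]
        omega
      have hcx : (x :: xs).count x = (xs.takeWhile (fun y => y == x)).length + 1 := by
        rw [List.count_cons_self, hxs0]
      -- count of any other value is its count in the rest
      have hcv : ∀ v, v ≠ x → (x :: xs).count v = (xs.dropWhile (fun y => y == x)).count v := by
        intro v hv
        have hvx : ¬ x = v := fun h => hv h.symm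
        have h1 : (x :: xs).count v = xs.count v := by simp [hvx]
        have h2 : xs.count v = (xs.dropWhile (fun y => y == x)).count v := by
          conv_lhs => rw [← hsplit]
          rw [List.count_append,
            List.count_eq_zero_of_not_mem (fun hmem => hv (ht v hmem)), Nat.zero_add]
        rw [h1, h2]
      -- the distinct values: ofList (x :: xs) is a permutation of x :: ofList rest
      have hnd1 : (PySem.Set.ofList (x :: xs) : List String).Nodup := PySem.Set.nodup_ofList _
      have hnd2 : (x :: (PySem.Set.ofList (xs.dropWhile (fun y => y == x)) : List String)).Nodup := by
        refine List.nodup_cons.mpr ⟨fun hc => hxr ((PySem.Set.mem_ofList _ _).mp hc), PySem.Set.nodup_ofList _⟩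
      have hperm : (PySem.Set.ofList (x :: xs) : List String).Perm
          (x :: (PySem.Set.ofList (xs.dropWhile (fun y => y == x)) : List String)) := by
        refine (List.perm_ext_iff_of_nodup hnd1 hnd2).mpr (fun a => ?_)
        rw [PySem.Set.mem_ofList]
        constructor
        · intro ha
          rcases List.mem_cons.mp ha with h1 | h2
          · simp [h1]
          · rw [← hsplit] at h2
            rcases List.mem_append.mp h2 with h3 | h4
            · simp [ht a h3]
            · exact List.mem_cons_of_mem _ ((PySem.Set.mem_ofList _ _).mpr h4)
        · intro ha
          rcases List.mem_cons.mp ha with h1 | h2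
          · simp [h1]
          · exact List.mem_cons_of_mem _
              ((List.dropWhile_sublist _).subset ((PySem.Set.mem_ofList _ _).mp h2))
      rw [hmRunScan, IH, hperm.countP_eq, List.countP_cons]
      have hrest : (PySem.Set.ofList (xs.dropWhile (fun y => y == x)) : List String).countP
            (fun v => decide (((x :: xs).count v : Int) ≤ 2 * k))
          = (PySem.Set.ofList (xs.dropWhile (fun y => y == x)) : List String).countP
            (fun v => decide (((xs.dropWhile (fun y => y == x)).count v : Int) ≤ 2 * k)) := by
        refine List.countP_congr (fun v hv => ?_)
        have hvr : v ∈ xs.dropWhile (fun y => y == x) := (PySem.Set.mem_ofList _ _).mp hv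
        have hvx : v ≠ x := fun h => hxr (h ▸ hvr)
        rw [hcv v hvx]
      rw [hrest, hcx]
      by_cases hc : ((xs.takeWhile (fun y => y == x)).length + 1 : Int) ≤ 2 * k
      · simp [hc]
        omega
      · simp [hc]

-- ===== VERDICT (by name: the statement is the Claim_ definition above) =====
theorem hands_magic_spec : Claim_equal_hands_magic := by
  intro k kn _
  show _ = _
  unfold hands_magic hands_magic_alt
  simp only []
  rw [counter_loop_eq, PySem.Dict.keys_counter]
  have hA : ((PySem.Set.ofList (kn.filter (fun s => PySem.Str.strIsdigit s)) : List String)).foldl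
      (fun (points : Int) num => if (PySem.Dict.counter (kn.filter (fun s => PySem.Str.strIsdigit s))).getD num 0 ≤ k + k then points + 1 else points) (0 : Int)
      = ((PySem.Set.ofList (kn.filter (fun s => PySem.Str.strIsdigit s)) : List String)).foldl
      (fun points num => if (decide (((kn.filter (fun s => PySem.Str.strIsdigit s)).count num : Int) ≤ k + k)) = true then points + 1 else points) 0 := by
    refine PySem.List.foldl_congr_mem _ _ _ _ (fun acc v _ => ?_)
    rw [PySem.Dict.getD_counter]
    simp
  refine hA.trans ?_
  rw [PySem.List.foldl_count_if]
  have hpw : (PySem.List.sorted (kn.filter (fun s => PySem.Str.strIsdigit s)) (fun x => x) false).Pairwise (· ≤ ·) :=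
    PySem.List.sorted_pairwise _ (fun x => x)
  rw [runScan_eq_aux k (PySem.List.sorted (kn.filter (fun s => PySem.Str.strIsdigit s)) (fun x => x) false).length _ le_rfl hpw]
  have hperm : (PySem.List.sorted (kn.filter (fun s => PySem.Str.strIsdigit s)) (fun x => x) false).Perm
      (kn.filter (fun s => PySem.Str.strIsdigit s)) := PySem.List.sorted_perm _ _ _
  have hop : ((PySem.Set.ofList (PySem.List.sorted (kn.filter (fun s => PySem.Str.strIsdigit s)) (fun x => x) false) : List String)).Perm
      ((PySem.Set.ofList (kn.filter (fun s => PySem.Str.strIsdigit s)) : List String)) := by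
    refine (List.perm_ext_iff_of_nodup (PySem.Set.nodup_ofList _) (PySem.Set.nodup_ofList _)).mpr (fun a => ?_)
    rw [PySem.Set.mem_ofList, PySem.Set.mem_ofList]
    exact hperm.mem_iff
  rw [hop.countP_eq]
  have hps : ((PySem.Set.ofList (kn.filter (fun s => PySem.Str.strIsdigit s)) : List String)).countP
        (fun v => decide (((PySem.List.sorted (kn.filter (fun s => PySem.Str.strIsdigit s)) (fun x => x) false).count v : Int) ≤ 2 * k))
      = ((PySem.Set.ofList (kn.filter (fun s => PySem.Str.strIsdigit s)) : List String)).countP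
        (fun v => decide (((kn.filter (fun s => PySem.Str.strIsdigit s)).count v : Int) ≤ k + k)) := by
    refine List.countP_congr (fun v _ => ?_)
    rw [hperm.count_eq v]
    constructor <;> · intro h; simp only [decide_eq_true_eq] at *; omega
  rw [hps]
  omega
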